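-- pv_equiv track=rewrite | github.com/jhopkins78/research_agency | insight_agent.py | _analyze_year_distribution
-- ===== SOURCE A (Python) =====
-- from typing import Dict, Any, List, Optional, Union
--
-- def _analyze_year_distribution(references: List[Dict[str, Any]]) -> Dict[str, int]:
--     """Analyze year distribution."""
--     years = {}
--
--     # Define year ranges
--     ranges = {
--         '2020-2024': (2020, 2024),
--         '2015-2019': (2015, 2019),
--         '2010-2014': (2010, 2014),
--         '2000-2009': (2000, 2009),
--         'Pre-2000': (0, 1999)
--     }
--
--     # Initialize counts
--     for range_name in ranges:
--         years[range_name] = 0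
--
--     # Count references by year range
--     for ref in references:
--         year = ref.get('year', 0)
--         if not year:
--             continue
--
--         for range_name, (start, end) in ranges.items():
--             if start <= year <= end:
--                 years[range_name] += 1
--                 break
--
--     return years
-- ===== SOURCE B (Python) =====
-- def _analyze_year_distribution(references):
--     """Analyze year distribution via a boundary table and hand-rolled binary search."""
--     breakpoints = [2000, 2010, 2015, 2020, 2025]
--     labels = ['Pre-2000', '2000-2009', '2010-2014', '2015-2019', '2020-2024']
--     counts = [0, 0, 0, 0, 0]
--     for ref in references:
--         year = ref.get('year', 0)
--         if year <= 0 or year >= 2025: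
--             continue
--         lo, hi = 0, 5
--         while lo < hi:  # bisect_right over breakpoints
--             mid = (lo + hi) // 2
--             if breakpoints[mid] <= year:
--                 lo = mid + 1
--             else:
--                 hi = mid
--         counts[lo] += 1
--     return {labels[i]: counts[i] for i in range(4, -1, -1)}
-- ===== Notes on version B (the rewrite author's own statement) =====
-- stated objective: alternative
-- what changed: Replaces the per-reference linear scan over a dict of (start,end) ranges with a binary search over a sorted boundary table into a parallel counts array, building the output dict once at the end in the original key order.
import Mathlib
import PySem

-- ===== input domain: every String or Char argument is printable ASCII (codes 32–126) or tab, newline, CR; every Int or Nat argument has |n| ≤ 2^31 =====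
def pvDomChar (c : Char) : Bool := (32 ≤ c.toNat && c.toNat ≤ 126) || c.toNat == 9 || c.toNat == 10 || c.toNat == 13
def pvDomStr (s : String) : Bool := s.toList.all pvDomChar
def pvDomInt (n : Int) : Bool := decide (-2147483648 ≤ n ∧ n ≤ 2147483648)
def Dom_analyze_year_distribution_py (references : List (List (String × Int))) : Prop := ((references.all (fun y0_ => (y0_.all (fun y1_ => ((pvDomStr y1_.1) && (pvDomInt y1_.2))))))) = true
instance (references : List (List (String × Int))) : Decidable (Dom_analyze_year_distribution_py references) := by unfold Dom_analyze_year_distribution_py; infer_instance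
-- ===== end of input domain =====

-- B replaces A's per-reference linear scan over the range dict with a binary search over a
-- sorted boundary table into a counts array (objective: alternative, same observable result).

-- ===== PORT A =====
-- ref.get('year', 0): first match in the assoc list representing the Python dict, default 0 (exact)
def pvGetYear (ref : List (String × Int)) : Int :=
  ((ref.find? (fun kv => kv.1 == "year")).map Prod.snd).getD 0

-- the 'ranges' dict, as its ordered (name, (start, end)) items
def pvRanges : List (String × Int × Int) :=
  [("2020-2024", 2020, 2024), ("2015-2019", 2015, 2019), ("2010-2014", 2010, 2014),
   ("2000-2009", 2000, 2009), ("Pre-2000", 0, 1999)]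

-- inner loop: 'for range_name, (start, end) in ranges.items(): if start <= year <= end: years[range_name] += 1; break'
-- ('years[range_name] += 1' on a key that is always present: overwrite-in-place insert is exact)
def pvBump (years : PySem.Dict String Int) (year : Int) : List (String × Int × Int) → PySem.Dict String Int
  | [] => years
  | (name, se) :: rest =>
    if se.1 ≤ year ∧ year ≤ se.2 then years.insert name (years.getD name 0 + 1)
    else pvBump years year rest

-- body of 'for ref in references'
def pvStepA (years : PySem.Dict String Int) (ref : List (String × Int)) : PySem.Dict String Int :=
  let year := pvGetYear ref
  if year = 0 then years else pvBump years year pvRanges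

def analyze_year_distribution_py (references : List (List (String × Int))) : List (String × Int) :=
  let years := pvRanges.foldl (fun d r => d.insert r.1 0) PySem.Dict.empty
  (references.foldl pvStepA years).items

-- ===== PORT B =====
def pvBreakpoints : List Int := [2000, 2010, 2015, 2020, 2025]
def pvLabels : List String := ["Pre-2000", "2000-2009", "2010-2014", "2015-2019", "2020-2024"]

-- the 'while lo < hi' binary-search loop of Source B, step for step
def pvBisect (year lo hi : Int) : Int :=
  if h : lo < hi then
    let mid := PySem.Int.floordiv (lo + hi) 2
    if PySem.List.pyGetD pvBreakpoints mid 0 ≤ year then pvBisect year (mid + 1) hi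
    else pvBisect year lo mid
  else lo
termination_by (hi - lo).toNat
decreasing_by
  · have := PySem.Int.floordiv_two_mid_bounds (lo := lo) (hi := hi) (by omega)
    omega
  · have h2 : PySem.Int.floordiv (lo + hi) 2 < hi := by
      rw [PySem.Int.floordiv_lt_iff_lt_mul (by omega)]; omega
    have := PySem.Int.floordiv_two_mid_bounds (lo := lo) (hi := hi) (by omega)
    omega

-- body of 'for ref in references' in Source B
def pvStepB (counts : List Int) (ref : List (String × Int)) : List Int :=
  let year := pvGetYear ref
  if year ≤ 0 ∨ 2025 ≤ year then counts
  else
    let lo := pvBisect year 0 5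
    PySem.List.pySetD counts lo (PySem.List.pyGetD counts lo 0 + 1)

-- final dict comprehension '{labels[i]: counts[i] for i in range(4, -1, -1)}'
def pvFinalize (counts : List Int) : List (String × Int) :=
  ((PySem.List.pyRange 4 (-1) (-1)).foldl
    (fun d i => d.insert (PySem.List.pyGetD pvLabels i "") (PySem.List.pyGetD counts i 0))
    (PySem.Dict.empty : PySem.Dict String Int)).items

def analyze_year_distribution_py_alt (references : List (List (String × Int))) : List (String × Int) :=
  pvFinalize (references.foldl pvStepB [0, 0, 0, 0, 0])

-- ===== PRECONDITION & SPEC =====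
def Spec_analyze_year_distribution_py (references : List (List (String × Int))) (out : List (String × Int)) : Prop := out = analyze_year_distribution_py_alt references
instance (references : List (List (String × Int))) (out : List (String × Int)) : Decidable (Spec_analyze_year_distribution_py references out) := by unfold Spec_analyze_year_distribution_py; infer_instance

-- ===== CLAIM (what is proved, stated in full; the proofs are below) =====
def Claim_equal_analyze_year_distribution_py : Prop := ∀ (references : List (List (String × Int))), Dom_analyze_year_distribution_py references → Spec_analyze_year_distribution_py references (analyze_year_distribution_py references)

-- ===== LEMMAS AND PROOFS =====

-- A's dict state with symbolic counts (c0 = Pre-2000 … c4 = 2020-2024), in A's insertion order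
def pvDfive (c0 c1 c2 c3 c4 : Int) : PySem.Dict String Int :=
  ((((PySem.Dict.empty.insert "2020-2024" c4).insert "2015-2019" c3).insert "2010-2014" c2).insert "2000-2009" c1).insert "Pre-2000" c0

-- evaluation of B's binary search on each of the five buckets
lemma pvBisect_bucket0 (y : Int) (h1 : 1 ≤ y) (h2 : y ≤ 1999) : pvBisect y 0 5 = 0 := by
  simp [pvBisect, pvBreakpoints, pysem, show ¬((2015:Int) ≤ y) from by omega,
    show ¬((2010:Int) ≤ y) from by omega, show ¬((2000:Int) ≤ y) from by omega]
lemma pvBisect_bucket1 (y : Int) (h1 : 2000 ≤ y) (h2 : y ≤ 2009) : pvBisect y 0 5 = 1 := by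
  simp [pvBisect, pvBreakpoints, pysem, show ¬((2015:Int) ≤ y) from by omega,
    show ¬((2010:Int) ≤ y) from by omega, show ((2000:Int) ≤ y) from by omega]
lemma pvBisect_bucket2 (y : Int) (h1 : 2010 ≤ y) (h2 : y ≤ 2014) : pvBisect y 0 5 = 2 := by
  simp [pvBisect, pvBreakpoints, pysem, show ¬((2015:Int) ≤ y) from by omega,
    show ((2010:Int) ≤ y) from by omega]
lemma pvBisect_bucket3 (y : Int) (h1 : 2015 ≤ y) (h2 : y ≤ 2019) : pvBisect y 0 5 = 3 := by
  simp [pvBisect, pvBreakpoints, pysem, show ((2015:Int) ≤ y) from by omega,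
    show ¬((2020:Int) ≤ y) from by omega, show ¬((2025:Int) ≤ y) from by omega]
lemma pvBisect_bucket4 (y : Int) (h1 : 2020 ≤ y) (h2 : y ≤ 2024) : pvBisect y 0 5 = 4 := by
  simp [pvBisect, pvBreakpoints, pysem, show ((2015:Int) ≤ y) from by omega,
    show ((2020:Int) ≤ y) from by omega, show ¬((2025:Int) ≤ y) from by omega]

-- one loop iteration: A's dict step and B's counts step bump the same bucket
lemma pvStep_eq (ref : List (String × Int)) (c0 c1 c2 c3 c4 : Int) :
    ∃ d0 d1 d2 d3 d4, pvStepB [c0, c1, c2, c3, c4] ref = [d0, d1, d2, d3, d4] ∧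
      pvStepA (pvDfive c0 c1 c2 c3 c4) ref = pvDfive d0 d1 d2 d3 d4 := by
  set y := pvGetYear ref with hy
  by_cases h0 : y ≤ 0
  · -- A: y = 0 is skipped, y < 0 matches no range; B: skipped
    refine ⟨c0, c1, c2, c3, c4, by simp [pvStepB, ← hy, h0], ?_⟩
    by_cases hz : y = 0
    · simp [pvStepA, ← hy, hz]
    · simp only [pvStepA, ← hy, if_neg hz, pvRanges, pvBump]
      rw [if_neg (by omega), if_neg (by omega), if_neg (by omega), if_neg (by omega),
          if_neg (by omega)]
  · by_cases h5 : 2025 ≤ y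
    · -- A: matches no range; B: skipped
      refine ⟨c0, c1, c2, c3, c4, by simp [pvStepB, ← hy, h5], ?_⟩
      simp only [pvStepA, ← hy, if_neg (by omega : ¬ y = 0), pvRanges, pvBump]
      rw [if_neg (by omega), if_neg (by omega), if_neg (by omega), if_neg (by omega),
          if_neg (by omega)]
    · by_cases h1 : y ≤ 1999
      · refine ⟨c0 + 1, c1, c2, c3, c4, ?_, ?_⟩
        · simp only [pvStepB, ← hy, if_neg (by omega : ¬ (y ≤ 0 ∨ 2025 ≤ y)),
            pvBisect_bucket0 y (by omega) (by omega)]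
          rfl
        · simp only [pvStepA, ← hy, if_neg (by omega : ¬ y = 0), pvRanges, pvBump]
          rw [if_neg (by omega), if_neg (by omega), if_neg (by omega), if_neg (by omega),
              if_pos (by omega)]
          rfl
      · by_cases h2 : y ≤ 2009
        · refine ⟨c0, c1 + 1, c2, c3, c4, ?_, ?_⟩
          · simp only [pvStepB, ← hy, if_neg (by omega : ¬ (y ≤ 0 ∨ 2025 ≤ y)),
              pvBisect_bucket1 y (by omega) (by omega)]
            rfl
          · simp only [pvStepA, ← hy, if_neg (by omega : ¬ y = 0), pvRanges, pvBump]
            rw [if_neg (by omega), if_neg (by omega), if_neg (by omega), if_pos (by omega)]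
            rfl
        · by_cases h3 : y ≤ 2014
          · refine ⟨c0, c1, c2 + 1, c3, c4, ?_, ?_⟩
            · simp only [pvStepB, ← hy, if_neg (by omega : ¬ (y ≤ 0 ∨ 2025 ≤ y)),
                pvBisect_bucket2 y (by omega) (by omega)]
              rfl
            · simp only [pvStepA, ← hy, if_neg (by omega : ¬ y = 0), pvRanges, pvBump]
              rw [if_neg (by omega), if_neg (by omega), if_pos (by omega)]
              rfl
          · by_cases h4 : y ≤ 2019
            · refine ⟨c0, c1, c2, c3 + 1, c4, ?_, ?_⟩
              · simp only [pvStepB, ← hy, if_neg (by omega : ¬ (y ≤ 0 ∨ 2025 ≤ y)),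
                  pvBisect_bucket3 y (by omega) (by omega)]
                rfl
              · simp only [pvStepA, ← hy, if_neg (by omega : ¬ y = 0), pvRanges, pvBump]
                rw [if_neg (by omega), if_pos (by omega)]
                rfl
            · refine ⟨c0, c1, c2, c3, c4 + 1, ?_, ?_⟩
              · simp only [pvStepB, ← hy, if_neg (by omega : ¬ (y ≤ 0 ∨ 2025 ≤ y)),
                  pvBisect_bucket4 y (by omega) (by omega)]
                rfl
              · simp only [pvStepA, ← hy, if_neg (by omega : ¬ y = 0), pvRanges, pvBump]
                rw [if_pos (by omega)]
                rfl

-- the two loops stay in lockstep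
lemma pvFold_eq (refs : List (List (String × Int))) :
    ∀ c0 c1 c2 c3 c4 : Int,
      ∃ d0 d1 d2 d3 d4, refs.foldl pvStepB [c0, c1, c2, c3, c4] = [d0, d1, d2, d3, d4] ∧
        refs.foldl pvStepA (pvDfive c0 c1 c2 c3 c4) = pvDfive d0 d1 d2 d3 d4 := by
  induction refs with
  | nil => exact fun c0 c1 c2 c3 c4 => ⟨c0, c1, c2, c3, c4, rfl, rfl⟩
  | cons ref rest ih =>
    intro c0 c1 c2 c3 c4
    obtain ⟨e0, e1, e2, e3, e4, hB, hA⟩ := pvStep_eq ref c0 c1 c2 c3 c4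
    obtain ⟨d0, d1, d2, d3, d4, hB', hA'⟩ := ih e0 e1 e2 e3 e4
    exact ⟨d0, d1, d2, d3, d4, by simp [List.foldl_cons, hB, hB'],
      by simp [List.foldl_cons, hA, hA']⟩

lemma pvFinalize_Dfive (d0 d1 d2 d3 d4 : Int) :
    pvFinalize [d0, d1, d2, d3, d4] = (pvDfive d0 d1 d2 d3 d4).items := rfl

-- ===== VERDICT (by name: the statement is the Claim_ definition above) =====
theorem analyze_year_distribution_py_spec : Claim_equal_analyze_year_distribution_py := by
  intro refs _
  obtain ⟨d0, d1, d2, d3, d4, hB, hA⟩ := pvFold_eq refs 0 0 0 0 0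
  show analyze_year_distribution_py refs = analyze_year_distribution_py_alt refs
  simp only [analyze_year_distribution_py, analyze_year_distribution_py_alt]
  rw [show (pvRanges.foldl (fun d r => d.insert r.1 0) PySem.Dict.empty) = pvDfive 0 0 0 0 0 from rfl,
    hA, hB, pvFinalize_Dfive]
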